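-- pv_equiv track=rewrite | github.com/pvestal/tower-echo-brain | src/core/conversation_manager.py | _extract_key_fact
-- ===== SOURCE A (Python) =====
-- def _extract_key_fact(text: str) -> str:
--     """
--     Extract a key fact from text
--     """
--
--     # Simple extraction - could be enhanced with NLP
--     facts = []
--
--     # Look for "I am", "I have", "I like" patterns
--     personal_patterns = ["i am", "i have", "i like", "my name", "i want", "i need"]
--     text_lower = text.lower()
--
--     for pattern in personal_patterns:
--         if pattern in text_lower:
--             # Extract the sentence containing this pattern
--             sentences = text.split(".")
--             for sentence in sentences:
--                 if pattern in sentence.lower():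
--                     facts.append(sentence.strip())
--                     break
--
--     # Look for definitions or declarations
--     if " is " in text_lower or " are " in text_lower:
--         facts.append(text[:100])
--
--     return "; ".join(facts) if facts else text[:100]
-- ===== SOURCE B (Python) =====
-- def _extract_key_fact(text: str) -> str:
--     """
--     Extract a key fact from text
--     """
--     personal_patterns = ["i am", "i have", "i like", "my name", "i want", "i need"]
--
--     # Split into sentences ONCE; one forward pass records, for each pattern,
--     # the first sentence whose lowercase form contains it.
--     first_hit = {}
--     for sentence in text.split("."):
--         sentence_lower = sentence.lower()
--         for pattern in personal_patterns:
--             if pattern not in first_hit and pattern in sentence_lower: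
--                 first_hit[pattern] = sentence
--
--     facts = [first_hit[p].strip() for p in personal_patterns if p in first_hit]
--
--     text_lower = text.lower()
--     if " is " in text_lower or " are " in text_lower:
--         facts.append(text[:100])
--
--     return "; ".join(facts) if facts else text[:100]
-- ===== Notes on version B (the rewrite author's own statement) =====
-- stated objective: alternative
-- what changed: B splits the text into sentences once and makes a single forward pass over them, recording in a dict the first sentence containing each pattern, instead of A's per-pattern rescan that re-splits the text and re-lowers every sentence for every pattern; B also drops A's redundant whole-text membership guard.
import Mathlib
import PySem

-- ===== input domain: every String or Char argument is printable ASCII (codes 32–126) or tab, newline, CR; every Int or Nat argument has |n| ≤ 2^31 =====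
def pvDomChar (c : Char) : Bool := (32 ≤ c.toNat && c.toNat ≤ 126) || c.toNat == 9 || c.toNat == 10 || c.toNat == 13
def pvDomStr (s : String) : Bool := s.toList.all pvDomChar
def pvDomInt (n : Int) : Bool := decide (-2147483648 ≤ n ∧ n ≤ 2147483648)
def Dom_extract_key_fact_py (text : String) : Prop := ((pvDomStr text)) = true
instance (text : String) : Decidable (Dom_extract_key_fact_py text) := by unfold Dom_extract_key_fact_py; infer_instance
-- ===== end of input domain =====

-- B splits the text into sentences once and fills a first-hit dict in a single forward pass,
-- instead of A's per-pattern rescan; an alternative decomposition of the same cost.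


-- the pattern list both programs share
def pvPatterns : List String := ["i am", "i have", "i like", "my name", "i want", "i need"]

-- ===== PORT A =====
-- A's inner 'for sentence in sentences: if pattern in sentence.lower(): facts.append(sentence.strip()); break'
def pvFactLoopA (pattern : String) (facts : List String) : List String → List String
  | [] => facts
  | s :: rest =>
    if PySem.Str.isIn pattern (PySem.Str.lower s) then facts ++ [PySem.Str.strip s]
    else pvFactLoopA pattern facts rest

def extract_key_fact_py (text : String) : String :=
  let text_lower := PySem.Str.lower text
  let facts : List String :=
    pvPatterns.foldl (fun facts pattern =>
      if PySem.Str.isIn pattern text_lower then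
        pvFactLoopA pattern facts ((PySem.Str.split? text ".").getD [])
      else facts) []
  let facts :=
    if PySem.Str.isIn " is " text_lower || PySem.Str.isIn " are " text_lower then
      facts ++ [PySem.Str.slice text none (some 100)]
    else facts
  if facts.isEmpty then PySem.Str.slice text none (some 100) else PySem.Str.join "; " facts

-- ===== PORT B =====
-- B's inner 'for pattern in personal_patterns: if pattern not in first_hit and pattern in sentence_lower: first_hit[pattern] = sentence'
def pvRecordB (s sl : String) (d : PySem.Dict String String) : PySem.Dict String String :=
  pvPatterns.foldl (fun d pattern =>
    if (PySem.Dict.get? d pattern).isNone && PySem.Str.isIn pattern sl then d.insert pattern s else d) d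

def extract_key_fact_py_alt (text : String) : String :=
  let first_hit : PySem.Dict String String :=
    ((PySem.Str.split? text ".").getD []).foldl
      (fun d sentence => pvRecordB sentence (PySem.Str.lower sentence) d) PySem.Dict.empty
  let facts : List String :=
    pvPatterns.foldl (fun fs p =>
      match PySem.Dict.get? first_hit p with
      | some s => fs ++ [PySem.Str.strip s]
      | none => fs) []
  let text_lower := PySem.Str.lower text
  let facts :=
    if PySem.Str.isIn " is " text_lower || PySem.Str.isIn " are " text_lower then
      facts ++ [PySem.Str.slice text none (some 100)]
    else facts
  if facts.isEmpty then PySem.Str.slice text none (some 100) else PySem.Str.join "; " facts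

-- ===== PRECONDITION & SPEC =====
def Spec_extract_key_fact_py (text : String) (out : String) : Prop := out = extract_key_fact_py_alt text
instance (text : String) (out : String) : Decidable (Spec_extract_key_fact_py text out) := by unfold Spec_extract_key_fact_py; infer_instance

-- ===== CLAIM (what is proved, stated in full; the proofs are below) =====
def Claim_equal_extract_key_fact_py : Prop := ∀ (text : String), Dom_extract_key_fact_py text → Spec_extract_key_fact_py text (extract_key_fact_py text)

-- ===== LEMMAS AND PROOFS =====

-- every piece produced by Chars.splitOn.go is an infix of any s that the loop state fits into
lemma pv_go_infix (sep : List Char) (fuel : Nat) :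
    ∀ (l cur : List Char) (acc : List (List Char)) (s : List Char),
      (∀ y ∈ acc, y <:+: s) → (cur.reverse ++ l <:+: s) →
      ∀ x ∈ PySem.Chars.splitOn.go sep fuel l cur acc, x <:+: s := by
  induction fuel with
  | zero =>
    intro l cur acc s hacc hcl x hx
    rw [PySem.Chars.splitOn.go.eq_def] at hx
    simp only [List.mem_reverse, List.mem_cons] at hx
    rcases hx with h | h
    · exact h ▸ hcl
    · exact hacc x h
  | succ fuel ih =>
    intro l cur acc s hacc hcl x hx
    cases l with
    | nil =>
      rw [PySem.Chars.splitOn.go.eq_def] at hx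
      simp only [List.mem_reverse, List.mem_cons] at hx
      rcases hx with h | h
      · subst h; simpa using hcl
      · exact hacc x h
    | cons c rest =>
      rw [PySem.Chars.splitOn.go.eq_def] at hx
      have hx : x ∈ (if sep.isPrefixOf (c :: rest) = true then
          PySem.Chars.splitOn.go sep fuel (List.drop sep.length (c :: rest)) [] (cur.reverse :: acc)
        else PySem.Chars.splitOn.go sep fuel rest (c :: cur) acc) := hx
      by_cases hp : sep.isPrefixOf (c :: rest) = true
      · rw [if_pos hp] at hx
        refine ih _ _ _ s ?_ ?_ x hx
        · intro y hy
          rcases List.mem_cons.mp hy with h | h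
          · subst h
            exact List.IsInfix.trans ⟨[], c :: rest, by simp⟩ hcl
          · exact hacc y h
        · exact List.IsInfix.trans
            (List.IsInfix.trans (List.drop_suffix _ _).isInfix ⟨cur.reverse, [], by simp⟩) hcl
      · rw [if_neg hp] at hx
        refine ih _ _ _ s hacc ?_ x hx
        simpa using hcl

lemma pv_mem_splitOn_infix (x s sep : List Char) (hx : x ∈ PySem.Chars.splitOn s sep) : x <:+: s := by
  unfold PySem.Chars.splitOn at hx
  exact pv_go_infix sep (s.length + 1) s [] [] s (by simp) (by simp) x hx

-- the sentence list of both ports, named for the proofs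
lemma pv_sentences_eq (text : String) :
    (PySem.Str.split? text ".").getD [] =
      (PySem.Chars.splitOn text.toList ['.']).map String.ofList := by
  simp [PySem.Str.split?, PySem.Chars.split?]

-- a sentence matching the pattern forces A's whole-text guard to be true
lemma pv_guard_of_mem (text p s : String)
    (hs : s ∈ (PySem.Str.split? text ".").getD [])
    (hin : PySem.Str.isIn p (PySem.Str.lower s) = true) :
    PySem.Str.isIn p (PySem.Str.lower text) = true := by
  rw [pv_sentences_eq] at hs
  rcases List.mem_map.mp hs with ⟨x, hxmem, hxeq⟩
  have hinf : x <:+: text.toList := pv_mem_splitOn_infix x text.toList ['.'] hxmem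
  rw [PySem.Str.isIn_iff_infix] at hin ⊢
  rw [PySem.Str.toList_lower] at hin ⊢
  have hstl : s.toList = x := by rw [← hxeq, String.toList_ofList]
  rw [hstl] at hin
  exact List.IsInfix.trans hin (by simpa [PySem.Chars.lower] using List.IsInfix.map PySem.Chars.lowerChar hinf)

-- A's break loop appends the first matching sentence, stripped
lemma pv_loopA_eq (p : String) (facts : List String) (ss : List String) :
    pvFactLoopA p facts ss =
      facts ++ (match ss.find? (fun s => PySem.Str.isIn p (PySem.Str.lower s)) with
        | some s => [PySem.Str.strip s]
        | none => []) := by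
  induction ss with
  | nil => simp [pvFactLoopA]
  | cons s rest ih =>
    by_cases h : PySem.Str.isIn p (PySem.Str.lower s) = true
    · rw [List.find?_cons_of_pos (p := fun t => PySem.Str.isIn p (PySem.Str.lower t)) h]
      simp only [pvFactLoopA, if_pos h]
    · rw [List.find?_cons_of_neg (p := fun t => PySem.Str.isIn p (PySem.Str.lower t)) h]
      simp only [pvFactLoopA, if_neg h, ih]

-- B's inner pattern loop, characterised by one lookup
lemma pv_recordB_get? (ps : List String) (s sl : String) :
    ∀ (d : PySem.Dict String String) (p : String),
      PySem.Dict.get?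
        (ps.foldl (fun d pattern =>
          if ((PySem.Dict.get? d pattern).isNone && PySem.Str.isIn pattern sl) = true then d.insert pattern s else d) d) p
      = if p ∈ ps ∧ (PySem.Dict.get? d p).isNone = true ∧ PySem.Str.isIn p sl = true
        then some s else PySem.Dict.get? d p := by
  induction ps with
  | nil => intro d p; simp
  | cons q rest ih =>
    intro d p
    simp only [List.foldl_cons]
    rw [ih]
    by_cases hpq : p = q
    · subst hpq
      by_cases hn : (PySem.Dict.get? d p).isNone = true
      · by_cases hin : PySem.Str.isIn p sl = true
        · have hc : ((PySem.Dict.get? d p).isNone && PySem.Str.isIn p sl) = true := by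
            rw [hn, hin]; rfl
          rw [if_pos hc, PySem.Dict.get?_insert_self]
          rw [if_neg (by simp), if_pos ⟨List.mem_cons_self, hn, hin⟩]
        · have hc : ¬ (((PySem.Dict.get? d p).isNone && PySem.Str.isIn p sl) = true) := by
            rw [hn]; simpa using hin
          rw [if_neg hc, if_neg (fun h => hin h.2.2), if_neg (fun h => hin h.2.2)]
      · have hc : ¬ (((PySem.Dict.get? d p).isNone && PySem.Str.isIn p sl) = true) := by
          simp only [Bool.and_eq_true]; exact fun h => hn h.1
        rw [if_neg hc, if_neg (fun h => hn h.2.1), if_neg (fun h => hn h.2.1)]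
    · have hd1 : PySem.Dict.get?
          (if ((PySem.Dict.get? d q).isNone && PySem.Str.isIn q sl) = true then d.insert q s else d) p
          = PySem.Dict.get? d p := by
        split_ifs with hcq
        · rw [PySem.Dict.get?_insert, if_neg hpq]
        · rfl
      rw [hd1]
      simp only [List.mem_cons, hpq, false_or]

-- B's sentence pass: the dict records, per pattern, the first matching sentence
lemma pv_buildB_get? (ss : List String) :
    ∀ (d : PySem.Dict String String) (p : String), p ∈ pvPatterns →
      PySem.Dict.get?
        (ss.foldl (fun d sentence => pvRecordB sentence (PySem.Str.lower sentence) d) d) p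
      = (PySem.Dict.get? d p).or
          (ss.find? (fun s => PySem.Str.isIn p (PySem.Str.lower s))) := by
  induction ss with
  | nil => intro d p _; cases h : PySem.Dict.get? d p <;> simp [h, List.find?]
  | cons s rest ih =>
    intro d p hmem
    simp only [List.foldl_cons]
    rw [ih _ p hmem]
    unfold pvRecordB
    rw [pv_recordB_get? pvPatterns s (PySem.Str.lower s) d p]
    by_cases hin : PySem.Str.isIn p (PySem.Str.lower s) = true
    · rw [List.find?_cons_of_pos (p := fun t => PySem.Str.isIn p (PySem.Str.lower t)) hin]
      have hin' : PySem.Chars.isIn p.toList (PySem.Chars.lower s.toList) = true := by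
        simpa using hin
      cases h : PySem.Dict.get? d p with
      | none => simp [hmem, hin']
      | some v => simp
    · rw [List.find?_cons_of_neg (p := fun t => PySem.Str.isIn p (PySem.Str.lower t)) hin]
      have hin' : PySem.Chars.isIn p.toList (PySem.Chars.lower s.toList) = false := by
        simpa using hin
      simp [hin']

-- the two ports build the same facts list
lemma pv_facts_eq (text : String) :
    pvPatterns.foldl (fun facts pattern =>
      if PySem.Str.isIn pattern (PySem.Str.lower text) then
        pvFactLoopA pattern facts ((PySem.Str.split? text ".").getD [])
      else facts) [] =
    pvPatterns.foldl (fun fs p =>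
      match PySem.Dict.get?
          (((PySem.Str.split? text ".").getD []).foldl
            (fun d sentence => pvRecordB sentence (PySem.Str.lower sentence) d) PySem.Dict.empty) p with
      | some s => fs ++ [PySem.Str.strip s]
      | none => fs) [] := by
  apply PySem.List.foldl_congr_mem
  intro acc p hp
  rw [pv_buildB_get? _ PySem.Dict.empty p hp]
  have hempty : PySem.Dict.get? (PySem.Dict.empty (κ := String) (ν := String)) p = none := rfl
  rw [hempty, Option.none_or]
  cases hf : ((PySem.Str.split? text ".").getD []).find?
      (fun s => PySem.Str.isIn p (PySem.Str.lower s)) with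
  | some s =>
    have hguard : PySem.Str.isIn p (PySem.Str.lower text) = true :=
      pv_guard_of_mem text p s (List.mem_of_find?_eq_some hf)
        (List.find?_some (p := fun t => PySem.Str.isIn p (PySem.Str.lower t)) hf)
    rw [if_pos hguard, pv_loopA_eq, hf]
  | none =>
    by_cases hguard : PySem.Str.isIn p (PySem.Str.lower text) = true
    · rw [if_pos hguard, pv_loopA_eq, hf]; simp
    · rw [if_neg hguard]

-- ===== VERDICT (by name: the statement is the Claim_ definition above) =====
theorem extract_key_fact_py_spec : Claim_equal_extract_key_fact_py := by
  intro text _hdom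
  unfold Spec_extract_key_fact_py
  simp only [extract_key_fact_py, extract_key_fact_py_alt]
  rw [pv_facts_eq text]
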